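-- pv_equiv track=rewrite | github.com/GuidoBitti/ProgramacionCompetitivaResueltos | VJudge/Tap2014/g.py | maxcedes
-- ===== SOURCE A (Python) =====
-- def maxcedes(N, puntajes):
--     puntajes.sort(reverse=True)
--     a = []
--     cambios = 0
--     german_puntos = 0
--     gianina_puntos = 0
--
--     for i in range(0, N, 2):
--         german_puntos += puntajes[i]
--         gianina_puntos += puntajes[i+1]
--         a.append(puntajes[i]-puntajes[i+1])
--
--     if german_puntos <= gianina_puntos:
--         return -1
--     else:
--         a.sort()
--         i = 0
--         while german_puntos > gianina_puntos and i <= len(a):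
--             german_puntos -= a[i]
--             gianina_puntos += a[i]
--             if german_puntos > gianina_puntos:
--                 cambios += 1
--                 i += 1
--             else:
--                 break
--         return cambios
-- ===== SOURCE B (Python) =====
-- def maxcedes(N, puntajes):
--     puntajes.sort(reverse=True)
--     diffs = [puntajes[i] - puntajes[i + 1] for i in range(0, N, 2)]
--     D = sum(diffs)
--     if D <= 0:
--         return -1
--     return _flips(diffs, D)
--
--
-- def _flips(diffs, g):
--     # quickselect-style divide and conquer: count how many of the smallest
--     # differences can be flipped while the doubled remaining lead g stays
--     # positive, without ever sorting the differences.
--     if not diffs: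
--         return 0
--     p = diffs[len(diffs) // 2]
--     lo = [x for x in diffs if x < p]
--     hi = [x for x in diffs if x > p]
--     m = len(diffs) - len(lo) - len(hi)
--     slo = sum(lo)
--     if 2 * slo >= g:
--         return _flips(lo, g)
--     g2 = g - 2 * slo
--     if 2 * m * p < g2:
--         return len(lo) + m + _flips(hi, g2 - 2 * m * p)
--     return len(lo) + (g2 - 1) // (2 * p)
-- ===== Notes on version B (the rewrite author's own statement) =====
-- stated objective: alternative
-- what changed: B never sorts the differences: after the in-place reverse sort of puntajes it counts the flippable smallest differences by a quickselect-style divide and conquer (3-way partition around a pivot, closed-form count on the pivot block, recursion into one side), instead of A's sort of the diff list followed by a sequential while-loop over two running totals.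
import Mathlib
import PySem

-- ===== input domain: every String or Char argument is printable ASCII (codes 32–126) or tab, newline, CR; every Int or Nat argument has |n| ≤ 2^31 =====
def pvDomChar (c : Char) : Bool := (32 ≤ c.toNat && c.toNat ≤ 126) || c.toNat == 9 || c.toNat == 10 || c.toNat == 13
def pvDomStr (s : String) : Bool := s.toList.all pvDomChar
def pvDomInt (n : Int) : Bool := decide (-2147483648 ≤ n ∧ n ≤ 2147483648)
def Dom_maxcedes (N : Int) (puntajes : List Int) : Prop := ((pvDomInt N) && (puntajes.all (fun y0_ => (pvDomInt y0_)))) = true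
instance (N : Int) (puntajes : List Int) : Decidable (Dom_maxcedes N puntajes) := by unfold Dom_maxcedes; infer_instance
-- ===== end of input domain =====

-- B counts the flippable smallest pair-differences by a quickselect-style divide and
-- conquer (3-way partition around a pivot) instead of A's sort-the-diffs + while-loop;
-- both Pythons sort `puntajes` in place (the equivalence proved here is about the return value).

-- ===== PORT A =====
-- the Python `while` loop of A, with fuel making the recursion structural (fuel is ample,
-- it only mirrors the loop's own bound i <= len(a))
def maxcedesWhile (a : List Int) : Nat → Int → Int → Int → Int → Int
  | 0, _, _, _, cambios => cambios
  | fuel+1, german, gianina, i, cambios =>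
    if gianina < german ∧ i ≤ (a.length : Int) then
      let x := PySem.List.pyGetD a i 0
      if gianina + x < german - x then
        maxcedesWhile a fuel (german - x) (gianina + x) (i + 1) (cambios + 1)
      else cambios
    else cambios

def maxcedes (N : Int) (puntajes : List Int) : Int :=
  let ps := PySem.List.sorted puntajes (fun x => x) true
  let st := (PySem.List.pyRange 0 N 2).foldl
      (fun (st : Int × Int × List Int) i =>
        (st.1 + PySem.List.pyGetD ps i 0,
         st.2.1 + PySem.List.pyGetD ps (i + 1) 0,
         st.2.2 ++ [PySem.List.pyGetD ps i 0 - PySem.List.pyGetD ps (i + 1) 0]))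
      (0, 0, [])
  if st.1 ≤ st.2.1 then -1
  else
    let b := PySem.List.sorted st.2.2 (fun x => x) false
    maxcedesWhile b (b.length + 2) st.1 st.2.1 0 0

-- ===== PORT B =====
-- _flips of Source B: 3-way partition around the middle element, recurse into one side.
-- diffs[len(diffs)//2] is ported with pyGetD (the index is in range since diffs != []);
-- pivot_mem is cited by decreasing_by for termination.
theorem pivot_mem (l : List Int) (h : ¬ l = []) :
    PySem.List.pyGetD l (PySem.Int.floordiv (l.length : Int) 2) 0 ∈ l := by
  have hlen : 0 < l.length := List.length_pos_iff.2 h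
  have h2 : PySem.Int.floordiv (l.length : Int) 2 = (l.length : Int) / 2 :=
    PySem.Int.floordiv_eq_ediv_of_pos (by omega)
  rw [h2, PySem.List.pyGetD_eq_getElem _ _ (by positivity) (by omega)]
  exact List.getElem_mem _

def flipsB (diffs : List Int) (g : Int) : Int :=
  if diffs = [] then 0
  else
    let p := PySem.List.pyGetD diffs (PySem.Int.floordiv (diffs.length : Int) 2) 0
    let lo := diffs.filter (fun x => x < p)
    let hi := diffs.filter (fun x => p < x)
    let m : Int := (diffs.length : Int) - lo.length - hi.length
    let slo := lo.sum
    if 2 * slo ≥ g then flipsB lo g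
    else
      let g2 := g - 2 * slo
      if 2 * m * p < g2 then (lo.length : Int) + m + flipsB hi (g2 - 2 * m * p)
      else (lo.length : Int) + PySem.Int.floordiv (g2 - 1) (2 * p)
termination_by diffs.length
decreasing_by
  all_goals
    simp only [List.length_unattach]
    exact (List.length_filter_lt_length_iff_exists.2
      ⟨⟨_, pivot_mem diffs (by assumption)⟩, List.mem_attach _ _, by simp⟩).trans_le
      (le_of_eq List.length_attach)

def maxcedes_alt (N : Int) (puntajes : List Int) : Int :=
  let ps := PySem.List.sorted puntajes (fun x => x) true
  let diffs := (PySem.List.pyRange 0 N 2).map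
      (fun i => PySem.List.pyGetD ps i 0 - PySem.List.pyGetD ps (i + 1) 0)
  let D := diffs.sum
  if D ≤ 0 then -1 else flipsB diffs D

-- ===== PRECONDITION & SPEC =====
-- Pre_ excludes exactly the inputs where A raises IndexError: it accesses puntajes[i] and
-- puntajes[i+1] for every i in range(0, N, 2), so it needs N ≤ len, and N < len when N is odd.
def Pre_maxcedes (N : Int) (puntajes : List Int) : Prop :=
  N ≤ (puntajes.length : Int) ∧ (N % 2 = 1 → N < (puntajes.length : Int))
instance (N : Int) (puntajes : List Int) : Decidable (Pre_maxcedes N puntajes) := by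
  unfold Pre_maxcedes; infer_instance

def pvWitness_maxcedes : Int × List Int := (4, [5, 1, 1, 0])

def Spec_maxcedes (N : Int) (puntajes : List Int) (out : Int) : Prop := out = maxcedes_alt N puntajes
instance (N : Int) (puntajes : List Int) (out : Int) : Decidable (Spec_maxcedes N puntajes out) := by
  unfold Spec_maxcedes; infer_instance

-- ===== CLAIM (what is proved, stated in full; the proofs are below) =====
def Claim_equal_maxcedes : Prop := ∀ (N : Int) (puntajes : List Int), Dom_maxcedes N puntajes → Pre_maxcedes N puntajes → Spec_maxcedes N puntajes (maxcedes N puntajes)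

-- ===== LEMMAS AND PROOFS =====

-- count of successive flips while the gap stays positive (A's loop, gap-only view)
def countLoop : List Int → Int → Int
  | [], _ => 0
  | x :: r, g => if 0 < g - 2 * x then 1 + countLoop r (g - 2 * x) else 0

-- count of ALL prefixes with positive remaining gap (full-scan, gap-only view; the
-- common reference both programs are reduced to)
def countAll : List Int → Int → Int
  | [], _ => 0
  | x :: r, g => (if 0 < g - 2 * x then 1 else 0) + countAll r (g - 2 * x)

theorem countAll_nonpos : ∀ (l : List Int) (g : Int), (∀ x ∈ l, 0 ≤ x) → g ≤ 0 → countAll l g = 0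
  | [], _, _, _ => rfl
  | x :: r, g, hnn, hg => by
    have hx : 0 ≤ x := hnn x (List.mem_cons_self ..)
    have : ¬ 0 < g - 2 * x := by omega
    simp only [countAll, if_neg this, zero_add]
    exact countAll_nonpos r (g - 2 * x) (fun y hy => hnn y (List.mem_cons_of_mem _ hy)) (by omega)

theorem countLoop_eq_countAll : ∀ (l : List Int) (g : Int), (∀ x ∈ l, 0 ≤ x) →
    countLoop l g = countAll l g
  | [], _, _ => rfl
  | x :: r, g, hnn => by
    have hr : ∀ y ∈ r, 0 ≤ y := fun y hy => hnn y (List.mem_cons_of_mem _ hy)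
    by_cases h : 0 < g - 2 * x
    · simp only [countLoop, countAll, if_pos h, countLoop_eq_countAll r _ hr]
    · simp only [countLoop, countAll, if_neg h]
      rw [countAll_nonpos r _ hr (by omega)]
      omega

theorem countAll_append : ∀ (A B : List Int) (g : Int),
    countAll (A ++ B) g = countAll A g + countAll B (g - 2 * A.sum)
  | [], B, g => by simp [countAll]
  | x :: r, B, g => by
    simp only [List.cons_append, countAll, countAll_append r B (g - 2 * x), List.sum_cons]
    have : g - 2 * x - 2 * r.sum = g - 2 * (x + r.sum) := by ring
    rw [this]
    ring

theorem countAll_all : ∀ (l : List Int) (g : Int), (∀ x ∈ l, 0 ≤ x) → 2 * l.sum < g →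
    countAll l g = (l.length : Int)
  | [], _, _, _ => rfl
  | x :: r, g, hnn, hs => by
    have hx : 0 ≤ x := hnn x (List.mem_cons_self ..)
    have hrs : 0 ≤ r.sum := List.sum_nonneg (fun y hy => hnn y (List.mem_cons_of_mem _ hy))
    simp only [List.sum_cons] at hs
    simp only [countAll, if_pos (by omega : 0 < g - 2 * x),
      countAll_all r (g - 2 * x) (fun y hy => hnn y (List.mem_cons_of_mem _ hy)) (by omega)]
    simp
    ring

-- sum of a constant list
theorem sum_const_list : ∀ (l : List Int) (p : Int), (∀ x ∈ l, x = p) → l.sum = (l.length : Int) * p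
  | [], _, _ => by simp
  | x :: r, p, h => by
    simp only [List.sum_cons, List.length_cons, h x (List.mem_cons_self ..),
      sum_const_list r p (fun y hy => h y (List.mem_cons_of_mem _ hy))]
    push_cast
    ring

-- countAll on a block of equal positive elements: the closed form B uses
theorem countAll_const : ∀ (l : List Int) (p g : Int), (∀ x ∈ l, x = p) → 0 < p → 0 < g →
    countAll l g = min (l.length : Int) ((g - 1) / (2 * p))
  | [], p, g, _, hp, hg => by
    have : 0 ≤ (g - 1) / (2 * p) := Int.ediv_nonneg (by omega) (by omega)
    simp [countAll]
    omega
  | x :: r, p, g, h, hp, hg => by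
    have hx : x = p := h x (List.mem_cons_self ..)
    have hr : ∀ y ∈ r, y = p := fun y hy => h y (List.mem_cons_of_mem _ hy)
    subst hx
    by_cases hc : 2 * x < g
    · have ih := countAll_const r x (g - 2 * x) hr hp (by omega)
      simp only [countAll, if_pos (by omega : 0 < g - 2 * x), ih]
      have hdiv : (g - 1) / (2 * x) = (g - 2 * x - 1) / (2 * x) + 1 := by
        have h1 : g - 1 = (g - 2 * x - 1) + 1 * (2 * x) := by ring
        rw [h1, Int.add_mul_ediv_right _ _ (by omega : (2 * x : Int) ≠ 0)]
      rw [hdiv, List.length_cons]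
      push_cast
      omega
    · have hz : countAll r (g - 2 * x) = 0 :=
        countAll_nonpos r _ (fun y hy => by rw [hr y hy]; omega) (by omega)
      have hdiv : (g - 1) / (2 * x) = 0 := Int.ediv_eq_zero_of_lt (by omega) (by omega)
      simp only [countAll, if_neg (by omega : ¬ 0 < g - 2 * x), hz, hdiv]
      have : (0 : Int) ≤ ((x :: r).length : Int) := by positivity
      omega

theorem count_filter_neg (l : List Int) (q : Int → Bool) (x : Int) (h : q x = false) :
    List.count x (l.filter q) = 0 :=
  List.count_eq_zero.2 (fun hm => by have := List.of_mem_filter hm; rw [h] at this; cases this)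

-- 3-way partition of a list around a pivot is a permutation of the list
theorem partition3_perm (l : List Int) (p : Int) :
    l.Perm (l.filter (fun x => x < p) ++ l.filter (fun x => x = p) ++ l.filter (fun x => p < x)) := by
  rw [List.perm_iff_count]
  intro x
  simp only [List.count_append]
  rcases lt_trichotomy x p with h | h | h
  · rw [List.count_filter (by simp [h]), count_filter_neg _ _ _ (by simp; omega),
        count_filter_neg _ _ _ (by simp; omega)]
    omega
  · rw [count_filter_neg _ _ _ (by simp [h]), List.count_filter (by simp [h]),
        count_filter_neg _ _ _ (by simp [h])]
    omega
  · rw [count_filter_neg _ _ _ (by simp; omega), count_filter_neg _ _ _ (by simp; omega),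
        List.count_filter (by simp [h])]
    omega

theorem pairwise_le_const (l : List Int) (p : Int) (h : ∀ x ∈ l, x = p) :
    l.Pairwise (· ≤ ·) := by
  induction l with
  | nil => exact List.Pairwise.nil
  | cons x t ih =>
    refine List.Pairwise.cons ?_ (ih (fun y hy => h y (List.mem_cons_of_mem _ hy)))
    intro y hy
    rw [h x (List.mem_cons_self ..), h y (List.mem_cons_of_mem _ hy)]

-- sorting a list = sorted smaller-than-pivot part ++ pivot block ++ sorted larger part
theorem sorted_partition3 (l : List Int) (p : Int) :
    PySem.List.sorted l (fun x => x) false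
      = PySem.List.sorted (l.filter (fun x => x < p)) (fun x => x) false
        ++ l.filter (fun x => x = p)
        ++ PySem.List.sorted (l.filter (fun x => p < x)) (fun x => x) false := by
  apply PySem.List.sorted_id_eq_of_perm_of_pairwise
  · refine List.Perm.trans ?_ (partition3_perm l p).symm
    exact ((PySem.List.sorted_perm _ _ _).append (List.Perm.refl _)).append
      (PySem.List.sorted_perm _ _ _)
  · rw [List.pairwise_append, List.pairwise_append]
    refine ⟨⟨PySem.List.sorted_pairwise _ _, ?_, ?_⟩, PySem.List.sorted_pairwise _ _, ?_⟩
    · exact pairwise_le_const _ p (fun x hx => by simpa using List.of_mem_filter hx)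
    · intro a ha b hb
      have ha' : a < p := by simpa using List.of_mem_filter ((PySem.List.mem_sorted ..).1 ha)
      have hb' : b = p := by simpa using List.of_mem_filter hb
      omega
    · intro a ha b hb
      have hb' : p < b := by simpa using List.of_mem_filter ((PySem.List.mem_sorted ..).1 hb)
      rcases List.mem_append.1 ha with ha | ha
      · have : a < p := by simpa using List.of_mem_filter ((PySem.List.mem_sorted ..).1 ha)
        omega
      · have : a = p := by simpa using List.of_mem_filter ha
        omega

-- the divide-and-conquer count equals the full scan of the sorted list
theorem flipsB_eq (l : List Int) (g : Int) (hnn : ∀ x ∈ l, 0 ≤ x) :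
    flipsB l g = countAll (PySem.List.sorted l (fun x => x) false) g := by
  induction hn : l.length using Nat.strong_induction_on generalizing l g with
  | _ n ih =>
  rw [flipsB]
  by_cases hnil : l = []
  · subst hnil
    simp [countAll, PySem.List.sorted]
  · rw [if_neg hnil]
    simp only []
    set p := PySem.List.pyGetD l (PySem.Int.floordiv (l.length : Int) 2) 0 with hpdef
    have hlen : 0 < l.length := List.length_pos_iff.2 hnil
    have hpmem : p ∈ l := pivot_mem l hnil
    have hp0 : 0 ≤ p := hnn p hpmem
    set lo := l.filter (fun x => x < p) with hlo
    set eq := l.filter (fun x => x = p) with heq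
    set hi := l.filter (fun x => p < x) with hhi
    have hlolt : lo.length < l.length :=
      List.length_filter_lt_length_iff_exists.2 ⟨p, hpmem, by simp⟩
    have hhilt : hi.length < l.length :=
      List.length_filter_lt_length_iff_exists.2 ⟨p, hpmem, by simp⟩
    have hlonn : ∀ x ∈ lo, 0 ≤ x := fun x hx => hnn x (List.mem_filter.1 hx).1
    have heqnn : ∀ x ∈ eq, x = p := fun x hx => by simpa using List.of_mem_filter hx
    have hhinn : ∀ x ∈ hi, 0 ≤ x := fun x hx => hnn x (List.mem_filter.1 hx).1
    have hsplit := sorted_partition3 l p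
    rw [← hlo, ← heq, ← hhi] at hsplit
    have hlosum : (PySem.List.sorted lo (fun x => x) false).sum = lo.sum :=
      (PySem.List.sorted_perm _ _ _).sum_eq
    have hlolen : (PySem.List.sorted lo (fun x => x) false).length = lo.length :=
      PySem.List.length_sorted _ _ _
    have hmeq : (l.length : Int) - lo.length - hi.length = (eq.length : Int) := by
      have := (partition3_perm l p).length_eq
      rw [← hlo, ← heq, ← hhi] at this
      simp only [List.length_append] at this
      omega
    rw [hsplit, countAll_append, countAll_append, List.sum_append, hlosum,
      (by ring : g - 2 * (lo.sum + eq.sum) = g - 2 * lo.sum - 2 * eq.sum)]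
    by_cases hb1 : 2 * lo.sum ≥ g
    · rw [if_pos hb1]
      have h0 : countAll eq (g - 2 * lo.sum) = 0 :=
        countAll_nonpos _ _ (fun x hx => by rw [heqnn x hx]; omega) (by omega)
      have h0' : countAll (PySem.List.sorted hi (fun x => x) false) (g - 2 * lo.sum - 2 * eq.sum) = 0 := by
        refine countAll_nonpos _ _ (fun x hx => hhinn x ((PySem.List.mem_sorted ..).1 hx)) ?_
        have : 0 ≤ eq.sum := List.sum_nonneg (fun x hx => by rw [heqnn x hx]; omega)
        omega
      rw [h0, h0', ih lo.length (by omega) lo g hlonn rfl]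
      omega
    · rw [if_neg hb1]
      have hg2 : 0 < g - 2 * lo.sum := by omega
      have hclo : countAll (PySem.List.sorted lo (fun x => x) false) g = (lo.length : Int) := by
        rw [← hlolen, countAll_all _ _ (fun x hx => hlonn x ((PySem.List.mem_sorted ..).1 hx))
          (by rw [hlosum]; omega)]
      have heqsum : eq.sum = (eq.length : Int) * p := sum_const_list eq p heqnn
      rw [hmeq]
      by_cases hb2 : 2 * (eq.length : Int) * p < g - 2 * lo.sum
      · rw [if_pos hb2]
        have hceq : countAll eq (g - 2 * lo.sum) = (eq.length : Int) :=
          countAll_all _ _ (fun x hx => by rw [heqnn x hx]; omega)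
            (by rw [heqsum]; linarith)
        rw [hclo, hceq, heqsum,
          ih hi.length (by omega) hi _ hhinn rfl]
        have : g - 2 * lo.sum - 2 * ((eq.length : Int) * p)
            = g - 2 * lo.sum - 2 * (eq.length : Int) * p := by ring
        rw [this]
      · rw [if_neg hb2]
        have hp : 0 < p := by
          rcases eq_or_lt_of_le hp0 with h | h
          · exfalso
            rw [← h] at hb2
            simp at hb2
            omega
          · exact h
        have hceq : countAll eq (g - 2 * lo.sum)
            = min (eq.length : Int) ((g - 2 * lo.sum - 1) / (2 * p)) :=
          countAll_const eq p _ heqnn hp hg2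
        have hlt : (g - 2 * lo.sum - 1) / (2 * p) < (eq.length : Int) := by
          rw [Int.ediv_lt_iff_lt_mul (by omega)]
          nlinarith
        have h0' : countAll (PySem.List.sorted hi (fun x => x) false)
            (g - 2 * lo.sum - 2 * eq.sum) = 0 := by
          refine countAll_nonpos _ _ (fun x hx => hhinn x ((PySem.List.mem_sorted ..).1 hx)) ?_
          rw [heqsum]
          nlinarith
        rw [hclo, hceq, h0', PySem.Int.floordiv_eq_ediv_of_pos (by omega)]
        omega

theorem foldA_eq : ∀ (idxs : List Int) (ps : List Int) (g n : Int) (acc : List Int),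
    (idxs.foldl
      (fun (st : Int × Int × List Int) i =>
        (st.1 + PySem.List.pyGetD ps i 0,
         st.2.1 + PySem.List.pyGetD ps (i + 1) 0,
         st.2.2 ++ [PySem.List.pyGetD ps i 0 - PySem.List.pyGetD ps (i + 1) 0]))
      (g, n, acc))
    = (g + (idxs.map (fun i => PySem.List.pyGetD ps i 0)).sum,
       n + (idxs.map (fun i => PySem.List.pyGetD ps (i + 1) 0)).sum,
       acc ++ idxs.map (fun i => PySem.List.pyGetD ps i 0 - PySem.List.pyGetD ps (i + 1) 0))
  | [], ps, g, n, acc => by simp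
  | i :: t, ps, g, n, acc => by
    simp only [List.foldl_cons, List.map_cons, List.sum_cons]
    rw [foldA_eq t ps _ _ _]
    refine congrArg₂ Prod.mk (by ring) (congrArg₂ Prod.mk (by ring) ?_)
    simp

theorem sum_map_sub (l : List Int) (f g : Int → Int) :
    (l.map (fun i => f i - g i)).sum = (l.map f).sum - (l.map g).sum := by
  induction l with
  | nil => simp
  | cons x t ih => simp only [List.map_cons, List.sum_cons, ih]; ring

theorem whileLoop_eq : ∀ (rest pre : List Int) (german gianina cambios : Int) (fuel : Nat),
    rest.length + 1 ≤ fuel →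
    (∀ x ∈ rest, 0 ≤ x) →
    german - gianina < 2 * rest.sum →
    maxcedesWhile (pre ++ rest) fuel german gianina (pre.length : Int) cambios
      = cambios + countLoop rest (german - gianina)
  | [], pre, german, gianina, cambios, fuel, hfuel, _, hinv => by
    obtain ⟨f, rfl⟩ : ∃ f, fuel = f + 1 := ⟨fuel - 1, by omega⟩
    simp only [List.sum_nil, mul_zero] at hinv
    simp only [maxcedesWhile, countLoop, add_zero]
    rw [if_neg (by omega)]
  | x :: r, pre, german, gianina, cambios, fuel, hfuel, hnn, hinv => by
    obtain ⟨f, rfl⟩ : ∃ f, fuel = f + 1 := ⟨fuel - 1, by omega⟩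
    have hx : 0 ≤ x := hnn x (List.mem_cons_self ..)
    simp only [maxcedesWhile, countLoop]
    by_cases hg : gianina < german
    · rw [if_pos ⟨hg, by simp; omega⟩]
      have hget : PySem.List.pyGetD (pre ++ x :: r) (pre.length : Int) 0 = x := by
        rw [PySem.List.pyGetD_eq_getElem _ _ (by positivity) (by simp)]
        simp only [Int.toNat_natCast]
        rw [List.getElem_append_right (by omega)]
        simp
      rw [hget]
      by_cases hgx : gianina + x < german - x
      · rw [if_pos hgx, if_pos (by omega)]
        have harr : pre ++ x :: r = (pre ++ [x]) ++ r := by simp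
        have hidx : ((pre.length : Int) + 1) = ((pre ++ [x]).length : Int) := by simp
        rw [harr, hidx,
          whileLoop_eq r (pre ++ [x]) (german - x) (gianina + x) (cambios + 1) f
            (by simpa using hfuel)
            (fun y hy => hnn y (List.mem_cons_of_mem _ hy))
            (by simp only [List.sum_cons] at hinv; omega)]
        have : german - x - (gianina + x) = german - gianina - 2 * x := by ring
        rw [this]; ring
      · rw [if_neg hgx, if_neg (by omega), add_zero]
    · rw [if_neg (by intro h; exact hg h.1), if_neg (by omega), add_zero]

theorem diffs_nonneg (N : Int) (puntajes : List Int) (hpre : Pre_maxcedes N puntajes) :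
    ∀ v ∈ (PySem.List.pyRange 0 N 2).map
        (fun i => PySem.List.pyGetD (PySem.List.sorted puntajes (fun x => x) true) i 0
                - PySem.List.pyGetD (PySem.List.sorted puntajes (fun x => x) true) (i + 1) 0),
      0 ≤ v := by
  intro v hv
  obtain ⟨i, hi, rfl⟩ := List.mem_map.1 hv
  rw [PySem.List.mem_pyRange_iff_of_pos (by norm_num)] at hi
  obtain ⟨hi0, hiN, hdvd⟩ := hi
  obtain ⟨hlen, hodd⟩ := hpre
  set ps := PySem.List.sorted puntajes (fun x => x) true with hps
  have hpslen : ps.length = puntajes.length := PySem.List.length_sorted ..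
  have hi1 : i + 1 < (ps.length : Int) := by
    rw [hpslen]
    rcases Int.emod_two_eq N with h | h
    · omega
    · have := hodd h; omega
  rw [PySem.List.pyGetD_eq_getElem ps 0 (by omega) (by omega),
      PySem.List.pyGetD_eq_getElem ps 0 (by omega) (by omega)]
  have htn : (i + 1).toNat = i.toNat + 1 := by omega
  have hp := PySem.List.sorted_pairwise_rev puntajes (fun x => x)
  rw [← hps, List.pairwise_iff_getElem] at hp
  have hb : i.toNat + 1 < ps.length := by omega
  have := hp i.toNat (i.toNat + 1) (by omega) hb (by omega)
  simp only [htn]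
  omega

theorem maxcedes_spec_aux (N : Int) (puntajes : List Int) (hpre : Pre_maxcedes N puntajes) :
    maxcedes N puntajes = maxcedes_alt N puntajes := by
  unfold maxcedes maxcedes_alt
  simp only [foldA_eq, zero_add, List.nil_append]
  set ps := PySem.List.sorted puntajes (fun x => x) true with hps
  set ds := (PySem.List.pyRange 0 N 2).map
      (fun i => PySem.List.pyGetD ps i 0 - PySem.List.pyGetD ps (i + 1) 0) with hds
  set b := PySem.List.sorted ds (fun x => x) false with hb
  have hsum : b.sum = ds.sum := (PySem.List.sorted_perm ds (fun x => x) false).sum_eq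
  have hD : ds.sum = ((PySem.List.pyRange 0 N 2).map (fun i => PySem.List.pyGetD ps i 0)).sum
      - ((PySem.List.pyRange 0 N 2).map (fun i => PySem.List.pyGetD ps (i + 1) 0)).sum := by
    rw [hds, sum_map_sub]
  have hdsnn : ∀ x ∈ ds, 0 ≤ x := fun x hx => diffs_nonneg N puntajes hpre x hx
  have hnn : ∀ x ∈ b, 0 ≤ x := by
    intro x hx
    exact hdsnn x ((PySem.List.mem_sorted ..).1 hx)
  by_cases hle : ((PySem.List.pyRange 0 N 2).map (fun i => PySem.List.pyGetD ps i 0)).sum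
      ≤ ((PySem.List.pyRange 0 N 2).map (fun i => PySem.List.pyGetD ps (i + 1) 0)).sum
  · rw [if_pos hle, if_pos (by omega)]
  · rw [if_neg hle, if_neg (by omega)]
    have h0 : 0 < b.sum := by omega
    have := whileLoop_eq b []
        (((PySem.List.pyRange 0 N 2).map (fun i => PySem.List.pyGetD ps i 0)).sum)
        (((PySem.List.pyRange 0 N 2).map (fun i => PySem.List.pyGetD ps (i + 1) 0)).sum)
        0 (b.length + 2) (by omega) hnn (by omega)
    simp only [List.nil_append, List.length_nil, Int.ofNat_zero, zero_add] at this
    rw [this, flipsB_eq ds ds.sum hdsnn, ← hb,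
        countLoop_eq_countAll b _ hnn]
    congr 1
    omega

-- ===== VERDICT (by name: the statement is the Claim_ definition above) =====
theorem maxcedes_spec : Claim_equal_maxcedes := by
  intro N puntajes _ hpre
  exact maxcedes_spec_aux N puntajes hpre
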